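-- pv_equiv track=rewrite | github.com/aliqut/computercraft-build-schematic | schematicToLua.py | extract_block_data
-- ===== SOURCE A (Python) =====
-- def extract_block_data(palette, block_states, width, height, length):
--     structure = []
--     for y in range(height):
--         for z in range(length):
--             for x in range(width):
--                 index = y * width * length + z * width + x
--                 block_state = block_states[index]
--                 block_id = palette[block_state]
--
--                 # Skip air blocks and blocks with additional properties, eg: stairs, slabs, trapdoors. Only read full blocks
--                 if block_id == "minecraft:air" or '[' in block_id:
--                     continue
--
--                 structure.append(((x, y, z), block_id))
--
--     return structure
-- ===== SOURCE B (Python) =====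
-- def extract_block_data(palette, block_states, width, height, length):
--     # Stage 1: filter the palette ONCE into a dict of "solid" block ids, so the
--     # per-cell string tests (air check, '[' substring scan) disappear from the scan.
--     solid = {state: block_id for state, block_id in palette.items()
--              if block_id != "minecraft:air" and '[' not in block_id}
--     if width <= 0 or height <= 0 or length <= 0:
--         return []
--     # Stage 2: one linear scan over the flat block_states prefix; coordinates are
--     # decoded from the flat index with divmod.
--     layer = width * length
--     structure = []
--     for index, state in enumerate(block_states[:layer * height]):
--         block_id = solid.get(state)
--         if block_id is not None:
--             y, rem = divmod(index, layer)
--             z, x = divmod(rem, width)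
--             structure.append(((x, y, z), block_id))
--     return structure
-- ===== Notes on version B (the rewrite author's own statement) =====
-- stated objective: alternative
-- what changed: A's single triple-nested loop with per-cell string tests becomes two stages: the palette is filtered once into a dict of solid block ids (dropping air and '['-property blocks per palette entry instead of per cell), then one linear enumerate scan over the flat block_states prefix does a single dict lookup per cell and decodes (x, y, z) from the flat index with divmod.
import Mathlib
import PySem

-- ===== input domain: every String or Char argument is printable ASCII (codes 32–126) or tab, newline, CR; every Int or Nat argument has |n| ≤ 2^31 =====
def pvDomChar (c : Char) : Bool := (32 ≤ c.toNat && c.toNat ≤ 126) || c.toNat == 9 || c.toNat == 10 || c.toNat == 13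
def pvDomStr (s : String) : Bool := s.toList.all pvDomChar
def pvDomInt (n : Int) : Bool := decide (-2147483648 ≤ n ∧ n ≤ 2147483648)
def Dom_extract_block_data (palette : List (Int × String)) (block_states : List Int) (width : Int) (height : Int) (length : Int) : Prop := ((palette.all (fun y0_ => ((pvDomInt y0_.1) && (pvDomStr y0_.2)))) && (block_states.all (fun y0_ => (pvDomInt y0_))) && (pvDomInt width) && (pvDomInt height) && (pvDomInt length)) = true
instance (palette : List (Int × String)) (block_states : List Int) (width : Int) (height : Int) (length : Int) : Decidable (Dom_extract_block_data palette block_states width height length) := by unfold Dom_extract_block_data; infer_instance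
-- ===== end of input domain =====

-- B restructures A's single triple-nested scan with per-cell string tests into two
-- stages: the palette is filtered ONCE into a dict of solid block ids, then one
-- linear scan over the flat block_states prefix looks each state up in that dict
-- and decodes (x, y, z) from the flat index with divmod (objective: alternative).

-- ===== PORT A =====
-- Literal port of A's triple nested loop. Where Python raises (IndexError on
-- block_states[index], KeyError on palette[block_state]) the PySem primitive
-- returns none; those inputs are excluded by Pre_ and the port skips the cell.
def extract_block_data (palette : List (Int × String)) (block_states : List Int) (width : Int) (height : Int) (length : Int) : List ((Int × Int × Int) × String) :=
  (PySem.List.pyRange 0 height 1).foldl (fun st y =>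
    (PySem.List.pyRange 0 length 1).foldl (fun st z =>
      (PySem.List.pyRange 0 width 1).foldl (fun st x =>
        match PySem.List.pyGet? block_states (y * width * length + z * width + x) with
        | none => st   -- Python: IndexError (outside Pre_)
        | some block_state =>
          match (PySem.Dict.mk palette).get? block_state with
          | none => st -- Python: KeyError (outside Pre_)
          | some block_id =>
            if block_id = "minecraft:air" ∨ PySem.Str.isIn "[" block_id = true then
              st
            else
              st ++ [((x, y, z), block_id)]) st) st) []

-- ===== PORT B =====
-- the dict-comprehension filter of Source B's stage 1
def pvKeep (block_id : String) : Bool :=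
  !(block_id == "minecraft:air") && !(PySem.Str.isIn "[" block_id)

-- Literal port of Source B: stage 1 builds the filtered dict `solid` (a dict
-- comprehension = a fold of inserts over palette.items with the filter inside);
-- stage 2 folds over enumerate(block_states[:layer*height]) with solid.get and
-- Python-exact divmod (PySem.Int.floordiv/mod).
def extract_block_data_alt (palette : List (Int × String)) (block_states : List Int) (width : Int) (height : Int) (length : Int) : List ((Int × Int × Int) × String) :=
  let solid := (PySem.Dict.mk palette).items.foldl
    (fun d p => if pvKeep p.2 then d.insert p.1 p.2 else d) PySem.Dict.empty
  if width ≤ 0 ∨ height ≤ 0 ∨ length ≤ 0 then []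
  else
    let layer := width * length
    (PySem.List.enumerate (PySem.List.slice block_states none (some (layer * height))) 0).foldl
      (fun st p =>
        match solid.get? p.2 with
        | some block_id =>
          let y := PySem.Int.floordiv p.1 layer
          let rem := PySem.Int.mod p.1 layer
          let z := PySem.Int.floordiv rem width
          let x := PySem.Int.mod rem width
          st ++ [((x, y, z), block_id)]
        | none => st) []

-- ===== PRECONDITION & SPEC =====
-- Pre_ excludes exactly the inputs on which Python A raises: when all three
-- dimensions are positive, every scanned flat index must be inside block_states
-- (else IndexError) and every scanned block state must be a palette key (else
-- KeyError). The Nodup conjunct only rules out duplicate-key association lists,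
-- which no Python dict argument can produce (palette is a dict in Python).
def Pre_extract_block_data (palette : List (Int × String)) (block_states : List Int) (width : Int) (height : Int) (length : Int) : Prop :=
  (palette.map Prod.fst).Nodup ∧
  (0 < width → 0 < height → 0 < length →
    (width * height * length ≤ block_states.length ∧
      ∀ b ∈ block_states.take (width * height * length).toNat,
        ((PySem.Dict.mk palette).get? b).isSome = true))
instance (palette : List (Int × String)) (block_states : List Int) (width : Int) (height : Int) (length : Int) : Decidable (Pre_extract_block_data palette block_states width height length) := by unfold Pre_extract_block_data; infer_instance

def pvWitness_extract_block_data : (List (Int × String)) × List Int × Int × Int × Int :=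
  ([(0, "minecraft:air"), (1, "minecraft:stone")], [0, 1, 1, 0], 2, 1, 2)

def Spec_extract_block_data (palette : List (Int × String)) (block_states : List Int) (width : Int) (height : Int) (length : Int) (out : List ((Int × Int × Int) × String)) : Prop := out = extract_block_data_alt palette block_states width height length
instance (palette : List (Int × String)) (block_states : List Int) (width : Int) (height : Int) (length : Int) (out : List ((Int × Int × Int) × String)) : Decidable (Spec_extract_block_data palette block_states width height length out) := by unfold Spec_extract_block_data; infer_instance

-- ===== CLAIM (what is proved, stated in full; the proofs are below) =====
def Claim_equal_extract_block_data : Prop := ∀ (palette : List (Int × String)) (block_states : List Int) (width : Int) (height : Int) (length : Int), Dom_extract_block_data palette block_states width height length → Pre_extract_block_data palette block_states width height length → Spec_extract_block_data palette block_states width height length (extract_block_data palette block_states width height length)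

-- ===== LEMMAS AND PROOFS =====

-- proof-only middle form: the flat scan of B, but indexing with pyGet? and
-- looking up in the unfiltered palette with the keep-test inline
def pvFlat (palette : List (Int × String)) (block_states : List Int) (width : Int) (height : Int) (length : Int) : List ((Int × Int × Int) × String) :=
  if width ≤ 0 ∨ height ≤ 0 ∨ length ≤ 0 then []
  else
    (PySem.List.pyRange 0 (width * length * height) 1).foldl (fun st index =>
      match PySem.List.pyGet? block_states index with
      | none => st
      | some block_state =>
        match (PySem.Dict.mk palette).get? block_state with
        | none => st
        | some block_id =>
          if pvKeep block_id then
            let y := PySem.Int.floordiv index (width * length)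
            let rem := PySem.Int.mod index (width * length)
            let z := PySem.Int.floordiv rem width
            let x := PySem.Int.mod rem width
            st ++ [((x, y, z), block_id)]
          else st) []

theorem foldl_congr_mem'' {α β : Type} {l : List β} {f g : α → β → α} (init : α)
    (h : ∀ b ∈ l, ∀ a, f a b = g a b) : l.foldl f init = l.foldl g init :=
  PySem.List.foldl_congr_mem' l f g init h

theorem foldl_range_mul {α : Type} (g : Nat → α → α) (a b : Nat) (init : α) :
    (List.range (a * b)).foldl (fun acc i => g i acc) init =
      (List.range a).foldl
        (fun acc i => (List.range b).foldl (fun acc j => g (i * b + j) acc) acc) init := by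
  induction a generalizing init with
  | zero => simp
  | succ n ih =>
    rw [Nat.succ_mul, List.range_add, List.foldl_append, List.range_succ, List.foldl_append, ih]
    simp [List.foldl_map]

theorem pyRange_zero_cast (n : Nat) :
    PySem.List.pyRange 0 (n : Int) 1 = (List.range n).map (Nat.cast : Nat → Int) := by
  rw [PySem.List.pyRange_one]
  have h : ((n : Int) - 0).toNat = n := by omega
  rw [h]
  apply List.map_congr_left
  intro a _
  omega

theorem pvKeep_iff (bid : String) :
    pvKeep bid = true ↔ ¬(bid = "minecraft:air" ∨ PySem.Str.isIn "[" bid = true) := by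
  simp [pvKeep, not_or]

-- A equals the flat middle form (no precondition needed: both use pyGet?/get?).
theorem a_eq_flat (palette : List (Int × String)) (block_states : List Int) (width : Int) (height : Int) (length : Int) :
    extract_block_data palette block_states width height length = pvFlat palette block_states width height length := by
  by_cases hg : width ≤ 0 ∨ height ≤ 0 ∨ length ≤ 0
  · rw [pvFlat, if_pos hg, extract_block_data]
    rcases hg with hw | hh | hl
    · rw [PySem.List.pyRange_one_eq_nil hw]
      simp
    · rw [PySem.List.pyRange_one_eq_nil hh]
      simp
    · rw [PySem.List.pyRange_one_eq_nil hl]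
      simp
  · have hw : 0 < width := by omega
    have hh : 0 < height := by omega
    have hl : 0 < length := by omega
    clear hg
    obtain ⟨W, rfl⟩ : ∃ W : Nat, width = (W : Int) := ⟨width.toNat, (Int.toNat_of_nonneg hw.le).symm⟩
    obtain ⟨H, rfl⟩ : ∃ H : Nat, height = (H : Int) := ⟨height.toNat, (Int.toNat_of_nonneg hh.le).symm⟩
    obtain ⟨L, rfl⟩ : ∃ L : Nat, length = (L : Int) := ⟨length.toNat, (Int.toNat_of_nonneg hl.le).symm⟩
    have hW : 0 < W := by exact_mod_cast hw
    have hL : 0 < L := by exact_mod_cast hl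
    rw [pvFlat, if_neg (by omega)]
    have htot : (W : Int) * (L : Int) * (H : Int) = ((H * (L * W) : Nat) : Int) := by
      push_cast; ring
    rw [extract_block_data]
    simp only [htot, pyRange_zero_cast, List.foldl_map]
    simp only [foldl_range_mul]
    apply foldl_congr_mem''
    intro y _ acc
    apply foldl_congr_mem''
    intro z hz acc2
    apply foldl_congr_mem''
    intro x hx acc3
    rw [List.mem_range] at hz hx
    have hidx : ((y * (L * W) + (z * W + x) : Nat) : Int) = (y : Int) * W * L + (z : Int) * W + (x : Int) := by
      push_cast; ring
    have hr : z * W + x < L * W := by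
      calc z * W + x < (z + 1) * W := by rw [Nat.succ_mul]; omega
      _ ≤ L * W := Nat.mul_le_mul_right W hz
    have hWL : ((W : Int) * (L : Int)) = ((W * L : Nat) : Int) := by push_cast; ring
    have hd1 : (y * (L * W) + (z * W + x)) / (W * L) = y := by
      rw [Nat.mul_comm W L, Nat.mul_comm y (L * W), Nat.mul_add_div (by positivity), Nat.div_eq_of_lt hr]; omega
    have hd2 : (y * (L * W) + (z * W + x)) % (W * L) = z * W + x := by
      rw [Nat.mul_comm W L, Nat.mul_comm y (L * W), Nat.mul_add_mod, Nat.mod_eq_of_lt hr]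
    have hd3 : (z * W + x) / W = z := by
      rw [Nat.mul_comm z W, Nat.mul_add_div hW, Nat.div_eq_of_lt hx]; omega
    have hd4 : (z * W + x) % W = x := by
      rw [Nat.mul_comm z W, Nat.mul_add_mod, Nat.mod_eq_of_lt hx]
    rw [← hidx, hWL]
    simp only [PySem.Int.floordiv_natCast, PySem.Int.mod_natCast, hd1, hd2, hd3, hd4]
    rcases hbs : PySem.List.pyGet? block_states ((y * (L * W) + (z * W + x) : Nat) : Int) with _ | bstate
    · rfl
    · dsimp only
      rcases hpal : (PySem.Dict.mk palette).get? bstate with _ | bid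
      · rfl
      · dsimp only
        by_cases hk : pvKeep bid = true
        · rw [if_neg ((pvKeep_iff bid).mp hk), if_pos hk]
        · have hair : bid = "minecraft:air" ∨ PySem.Str.isIn "[" bid = true := by
            by_contra hc
            exact hk ((pvKeep_iff bid).mpr hc)
          rw [if_pos hair, if_neg hk]

-- a key absent from an association list looks up to none
theorem get?_mk_none (l : List (Int × String)) (s : Int) (h : s ∉ l.map Prod.fst) :
    (PySem.Dict.mk l).get? s = none := by
  rw [PySem.Dict.get?_eq_none_iff_not_mem_keys]
  simpa [PySem.Dict.keys, PySem.Dict.mk] using h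

-- looking up in the filtered palette = looking up, then applying the keep test
theorem mk_filter_get? (l : List (Int × String)) (hnd : (l.map Prod.fst).Nodup) (s : Int) :
    (PySem.Dict.mk (l.filter (fun p => pvKeep p.2))).get? s =
      (match (PySem.Dict.mk l).get? s with
       | some b => if pvKeep b then some b else none
       | none => none) := by
  induction l with
  | nil => rfl
  | cons hd tl ih =>
    rw [List.map_cons] at hnd
    obtain ⟨hh, hnd'⟩ := List.nodup_cons.mp hnd
    rcases hd with ⟨k, v⟩
    by_cases hk : pvKeep v = true
    · rw [List.filter_cons_of_pos (by simpa using hk)]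
      rw [show PySem.Dict.mk ((k, v) :: tl.filter (fun p => pvKeep p.2)) =
            ({ items := (k, v) :: tl.filter (fun p => pvKeep p.2) } : PySem.Dict Int String) from rfl,
          PySem.Dict.get?_mk_cons,
          show PySem.Dict.mk ((k, v) :: tl) = ({ items := (k, v) :: tl } : PySem.Dict Int String) from rfl,
          PySem.Dict.get?_mk_cons]
      by_cases he : (k == s) = true
      · simp [he, hk]
      · simp only [he, Bool.false_eq_true, if_false]
        exact ih hnd'
    · rw [List.filter_cons_of_neg (by simpa using hk)]
      rw [show PySem.Dict.mk ((k, v) :: tl) = ({ items := (k, v) :: tl } : PySem.Dict Int String) from rfl,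
          PySem.Dict.get?_mk_cons]
      by_cases he : (k == s) = true
      · have hs : s = k := by simpa using (beq_iff_eq.mp he).symm
        have habs : s ∉ (tl.filter (fun p => pvKeep p.2)).map Prod.fst := by
          intro hmem
          apply hh
          subst hs
          obtain ⟨p, hp, hp1⟩ := List.mem_map.mp hmem
          exact List.mem_map.mpr ⟨p, List.mem_of_mem_filter hp, hp1⟩
        rw [get?_mk_none _ _ habs]
        simp [he, hk]
      · simp only [he, Bool.false_eq_true, if_false]
        exact ih hnd'

-- stage 1 of B builds exactly the filtered palette as a dict
theorem solid_eq (palette : List (Int × String)) (hnd : (palette.map Prod.fst).Nodup) :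
    (PySem.Dict.mk palette).items.foldl
        (fun d p => if pvKeep p.2 then d.insert p.1 p.2 else d) PySem.Dict.empty =
      PySem.Dict.mk (palette.filter (fun p => pvKeep p.2)) := by
  apply PySem.Dict.ext
  show (List.foldl (fun d p => if pvKeep p.2 then d.insert p.1 p.2 else d)
      PySem.Dict.empty palette).items = palette.filter (fun p => pvKeep p.2)
  rw [PySem.List.foldl_if_eq_foldl_filter]
  have hfresh := PySem.Dict.items_foldl_insert_fresh
      (palette.filter (fun p => pvKeep p.2)) Prod.fst Prod.snd
      (PySem.Dict.empty : PySem.Dict Int String)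
      (fun a _ => by
        simp [PySem.Dict.contains,
          show (PySem.Dict.empty : PySem.Dict Int String).items = [] from rfl])
      (hnd.sublist (List.Sublist.map Prod.fst List.filter_sublist))
  have hempty : (PySem.Dict.empty : PySem.Dict Int String).items = [] := rfl
  rw [hfresh, hempty]
  simp

-- the flat middle form equals B (this is where Pre_ is used: the slice may not
-- truncate, and the filtered lookup must agree with lookup-then-test)
theorem flat_eq_b (palette : List (Int × String)) (block_states : List Int) (width : Int) (height : Int) (length : Int)
    (hnd : (palette.map Prod.fst).Nodup)
    (hlen : 0 < width → 0 < height → 0 < length → width * height * length ≤ block_states.length) :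
    pvFlat palette block_states width height length = extract_block_data_alt palette block_states width height length := by
  show pvFlat palette block_states width height length =
    (if width ≤ 0 ∨ height ≤ 0 ∨ length ≤ 0 then []
     else
       (PySem.List.enumerate (PySem.List.slice block_states none (some (width * length * height))) 0).foldl
         (fun st p =>
           match ((PySem.Dict.mk palette).items.foldl
               (fun d q => if pvKeep q.2 then d.insert q.1 q.2 else d) PySem.Dict.empty).get? p.2 with
           | some block_id =>
             st ++ [((PySem.Int.mod (PySem.Int.mod p.1 (width * length)) width,
                      PySem.Int.floordiv p.1 (width * length),
                      PySem.Int.floordiv (PySem.Int.mod p.1 (width * length)) width), block_id)]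
           | none => st) [])
  by_cases hg : width ≤ 0 ∨ height ≤ 0 ∨ length ≤ 0
  · rw [pvFlat, if_pos hg, if_pos hg]
  · rw [pvFlat, if_neg hg, if_neg hg]
    have hw : 0 < width := by omega
    have hh : 0 < height := by omega
    have hl : 0 < length := by omega
    have hT := hlen hw hh hl
    obtain ⟨W, rfl⟩ : ∃ W : Nat, width = (W : Int) := ⟨width.toNat, (Int.toNat_of_nonneg hw.le).symm⟩
    obtain ⟨H, rfl⟩ : ∃ H : Nat, height = (H : Int) := ⟨height.toNat, (Int.toNat_of_nonneg hh.le).symm⟩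
    obtain ⟨L, rfl⟩ : ∃ L : Nat, length = (L : Int) := ⟨length.toNat, (Int.toNat_of_nonneg hl.le).symm⟩
    have hcast : (W : Int) * (L : Int) * (H : Int) = ((W * L * H : Nat) : Int) := by push_cast; ring
    have hTn : W * L * H ≤ block_states.length := by
      have h1 : ((W * L * H : Nat) : Int) = (W : Int) * (H : Int) * (L : Int) := by
        push_cast; ring
      have h2 : ((W * L * H : Nat) : Int) ≤ (block_states.length : Int) := h1 ▸ hT
      exact_mod_cast h2
    rw [solid_eq palette hnd, hcast, PySem.List.slice_to block_states (Int.natCast_nonneg _)]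
    have htn : (((W * L * H : Nat) : Int)).toNat = W * L * H := by omega
    rw [htn]
    rw [PySem.List.enumerate_eq_map_pyRange (block_states.take (W * L * H)) 0]
    have hlen' : PySem.List.len (block_states.take (W * L * H)) = ((W * L * H : Nat) : Int) := by
      simp [PySem.List.len, Nat.min_eq_left hTn]
    rw [hlen', List.foldl_map]
    rw [← hcast]
    apply foldl_congr_mem''
    intro j hj st
    have hj' : 0 ≤ j ∧ j < (W : Int) * L * H := by
      have := PySem.List.mem_pyRange_one.mp hj
      omega
    obtain ⟨n, rfl⟩ : ∃ n : Nat, j = (n : Int) := ⟨j.toNat, by omega⟩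
    have hn : n < W * L * H := by
      have := hj'.2
      rw [hcast] at this
      exact_mod_cast this
    have hnl : n < block_states.length := lt_of_lt_of_le hn hTn
    have hget : PySem.List.pyGet? block_states ((n : Nat) : Int) = some (block_states.getD n 0) := by
      rw [PySem.List.pyGet?_natCast, List.getElem?_eq_getElem hnl,
          List.getD_eq_getElem?_getD, List.getElem?_eq_getElem hnl]
      rfl
    have hgetD : PySem.List.pyGetD (block_states.take (W * L * H)) ((n : Nat) : Int) 0 = block_states.getD n 0 := by
      rw [PySem.List.pyGetD_natCast, List.getD_eq_getElem?_getD, List.getD_eq_getElem?_getD,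
          List.getElem?_take_of_lt hn]
    rw [hget, hgetD]
    dsimp only
    rw [mk_filter_get? palette hnd (block_states.getD n 0)]
    rcases (PySem.Dict.mk palette).get? (block_states.getD n 0) with _ | bid
    · rfl
    · dsimp only
      by_cases hk : pvKeep bid = true
      · simp [hk]
      · rw [Bool.not_eq_true] at hk
        simp [hk]

theorem ports_eq (palette : List (Int × String)) (block_states : List Int) (width : Int) (height : Int) (length : Int)
    (hnd : (palette.map Prod.fst).Nodup)
    (hlen : 0 < width → 0 < height → 0 < length → width * height * length ≤ block_states.length) :
    extract_block_data palette block_states width height length = extract_block_data_alt palette block_states width height length :=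
  (a_eq_flat palette block_states width height length).trans
    (flat_eq_b palette block_states width height length hnd hlen)

-- ===== VERDICT (by name: the statement is the Claim_ definition above) =====
theorem extract_block_data_spec : Claim_equal_extract_block_data := by
  intro palette block_states width height length _ hpre
  unfold Spec_extract_block_data
  exact ports_eq palette block_states width height length hpre.1
    (fun hw hh hl => (hpre.2 hw hh hl).1)
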